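-- pv_equiv track=rewrite | github.com/Sipos-Lucas-George/Mini-Games | BattleShips/game/game.py | verifyInput
-- ===== SOURCE A (Python) =====
-- def verifyInput(playerInput):
--     alpha = "ABCDEF"
--     num = "012345"
--     playerInput = playerInput.split(" ")
--     for i in range(len(playerInput)):
--         playerInput[i] = playerInput[i].strip()
--         if playerInput == "":
--             pass
--         elif i == 0 and playerInput[i] != "ship":
--             return False
--         if i != 0:
--             for j in range(len(playerInput[i])):
--                 if j % 2 == 0 and alpha.count(playerInput[i][j]) == 0:
--                     return False
--                 elif j % 2 != 0 and num.count(playerInput[i][j]) == 0: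
--                     return False
--     return True
-- ===== SOURCE B (Python) =====
-- def _okToken(t):
--     while len(t) >= 2:
--         if t[0] not in "ABCDEF" or t[1] not in "012345":
--             return False
--         t = t[2:]
--     return len(t) == 0 or t[0] in "ABCDEF"
--
--
-- def verifyInput(playerInput):
--     tokens = [t.strip() for t in playerInput.split(" ")]
--     if tokens[0] != "ship":
--         return False
--     return all(_okToken(t) for t in tokens[1:])
-- ===== Notes on version B (the rewrite author's own statement) =====
-- stated objective: simpler
-- what changed: A walks each token by index with a j%2 parity test per character and str.count membership; B strips the tokens once, checks the first equals 'ship', and validates each remaining token by consuming it two characters at a time (letter then digit) with a plain membership test, plus an optional trailing letter.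
import Mathlib
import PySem

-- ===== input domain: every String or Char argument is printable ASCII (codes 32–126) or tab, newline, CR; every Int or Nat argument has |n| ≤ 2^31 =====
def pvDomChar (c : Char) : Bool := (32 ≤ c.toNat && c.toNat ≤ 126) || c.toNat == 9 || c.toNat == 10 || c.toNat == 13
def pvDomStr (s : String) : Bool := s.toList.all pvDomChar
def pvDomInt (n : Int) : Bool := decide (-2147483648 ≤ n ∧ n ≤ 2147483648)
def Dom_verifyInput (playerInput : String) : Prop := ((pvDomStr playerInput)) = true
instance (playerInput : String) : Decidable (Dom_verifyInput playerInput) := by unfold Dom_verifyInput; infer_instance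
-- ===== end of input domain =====

-- B replaces A's indexed j%2 character loop with a two-characters-at-a-time consumption of each
-- token and a plain all-tokens check; objective: simpler, same cost. Equivalence is on the return
-- value for every input (A never raises).

-- ===== PORT A =====
-- inner loop: for j in range(len(t)): parity check against alpha/num via str.count
def verifyInputInner (alpha num : List Char) (t : List Char) (j : Nat) : Bool :=
  match t with
  | [] => true
  | c :: cs =>
      if j % 2 == 0 && PySem.Chars.count alpha [c] == 0 then false
      else if j % 2 != 0 && PySem.Chars.count num [c] == 0 then false
      else verifyInputInner alpha num cs (j + 1)

-- outer loop over the split tokens with index i; each token stripped in place before use.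
-- (A's 'if playerInput == "": pass' compares the LIST to "", which is always False — omitted.)
def verifyInputOuter (alpha num : List Char) (i : Nat) (toks : List (List Char)) : Bool :=
  match toks with
  | [] => true
  | s :: rest =>
      let t := PySem.Chars.strip s
      if i == 0 && !(t == "ship".toList) then false
      else if i != 0 then
        if verifyInputInner alpha num t 0 then verifyInputOuter alpha num (i + 1) rest else false
      else verifyInputOuter alpha num (i + 1) rest

def verifyInput (playerInput : String) : Bool :=
  verifyInputOuter "ABCDEF".toList "012345".toList 0
    (PySem.Chars.splitOn playerInput.toList [' '])

-- ===== PORT B =====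
-- Source B's _okToken: 'while len(t) >= 2: check t[0], t[1]; t = t[2:]', then the ≤1-char remainder
def altOkToken (t : List Char) : Bool :=
  match t with
  | [] => true
  | [c] => PySem.Chars.isIn [c] "ABCDEF".toList
  | a :: b :: rest =>
      if !(PySem.Chars.isIn [a] "ABCDEF".toList) || !(PySem.Chars.isIn [b] "012345".toList) then
        false
      else altOkToken rest

def verifyInput_alt (playerInput : String) : Bool :=
  match (PySem.Chars.splitOn playerInput.toList [' ']).map PySem.Chars.strip with
  | [] => false   -- unreachable: str.split(" ") is never empty
  | first :: rest =>
      if !(first == "ship".toList) then false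
      else rest.all altOkToken

-- ===== PRECONDITION & SPEC =====
def Spec_verifyInput (playerInput : String) (out : Bool) : Prop := out = verifyInput_alt playerInput
instance (playerInput : String) (out : Bool) : Decidable (Spec_verifyInput playerInput out) := by unfold Spec_verifyInput; infer_instance

-- ===== CLAIM (what is proved, stated in full; the proofs are below) =====
def Claim_equal_verifyInput : Prop := ∀ (playerInput : String), Dom_verifyInput playerInput → Spec_verifyInput playerInput (verifyInput playerInput)

-- ===== LEMMAS AND PROOFS =====

-- str.count with a single-character needle counts occurrences of that character
theorem countGo_singleton (c : Char) :
    ∀ (fuel : Nat) (l : List Char) (acc : Nat), l.length ≤ fuel →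
      PySem.Chars.count.go [c] fuel l acc = acc + l.count c := by
  intro fuel
  induction fuel with
  | zero =>
      intro l acc h
      have : l = [] := List.length_eq_zero_iff.mp (Nat.le_zero.mp h)
      subst this
      simp [PySem.Chars.count.go]
  | succ n ih =>
      intro l acc h
      cases l with
      | nil => simp [PySem.Chars.count.go]
      | cons a t =>
          have ht : t.length ≤ n := by simpa using h
          by_cases hc : a = c
          · subst hc
            simp [PySem.Chars.count.go, List.isPrefixOf, ih _ _ ht]
            omega
          · have : ([c].isPrefixOf (a :: t)) = false := by
              simp [List.isPrefixOf]
              exact fun h' => (hc h'.symm).elim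
            simp [PySem.Chars.count.go, this, ih _ _ ht, hc]

theorem count_singleton (s : List Char) (c : Char) :
    PySem.Chars.count s [c] = s.count c := by
  simp [PySem.Chars.count]
  simpa using countGo_singleton c s.length s 0 (le_refl _)

theorem isIn_singleton (c : Char) (s : List Char) :
    PySem.Chars.isIn [c] s = s.contains c := by
  by_cases h : c ∈ s
  · have h1 : [c] <:+: s := by
      obtain ⟨l₁, l₂, rfl⟩ := List.append_of_mem h
      exact ⟨l₁, l₂, by simp⟩
    simp [(PySem.Chars.isIn_iff_infix _ _).mpr h1, h]
  · have h1 : ¬ [c] <:+: s := fun hin => h (hin.subset (by simp))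
    have h2 : PySem.Chars.isIn [c] s = false := by
      cases hh : PySem.Chars.isIn [c] s
      · rfl
      · exact absurd ((PySem.Chars.isIn_iff_infix _ _).mp hh) h1
    simp [h2, h]

theorem count_eq_zero_iff_not_contains (s : List Char) (c : Char) :
    (PySem.Chars.count s [c] == 0) = !(s.contains c) := by
  rw [count_singleton]
  by_cases h : c ∈ s
  · simp [h, List.count_eq_zero]
  · simp [h, List.count_eq_zero]

theorem inner_shift (alpha num : List Char) :
    ∀ (t : List Char) (j : Nat),
      verifyInputInner alpha num t (j + 2) = verifyInputInner alpha num t j := by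
  intro t
  induction t with
  | nil => intro j; simp [verifyInputInner]
  | cons c cs ih =>
      intro j
      have hm : (j + 2) % 2 = j % 2 := Nat.add_mod_right j 2
      simp only [verifyInputInner, hm]
      rw [show j + 2 + 1 = (j + 1) + 2 from by omega, ih (j + 1)]

theorem inner_zero :
    ∀ (t : List Char),
      verifyInputInner "ABCDEF".toList "012345".toList t 0 = altOkToken t
  | [] => by simp [verifyInputInner, altOkToken]
  | [c] => by
      simp only [verifyInputInner, altOkToken, count_eq_zero_iff_not_contains, isIn_singleton]
      cases ("ABCDEF".toList.contains c) <;> simp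
  | a :: b :: rest => by
      simp only [verifyInputInner, altOkToken, count_eq_zero_iff_not_contains, isIn_singleton]
      cases ha : ("ABCDEF".toList.contains a)
      · simp
      · cases hb : ("012345".toList.contains b)
        · simp [count_eq_zero_iff_not_contains, hb]
        · have hsh := inner_shift "ABCDEF".toList "012345".toList rest 0
          simp only [verifyInputInner, count_eq_zero_iff_not_contains, hb, Bool.not_true,
            Bool.not_false, Bool.and_false, Bool.and_true, Bool.false_or,
            Bool.false_eq_true, if_false]
          norm_num
          exact hsh.trans (inner_zero rest)

theorem outer_pos (i : Nat) (hi : i ≠ 0) :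
    ∀ (toks : List (List Char)) ,
      verifyInputOuter "ABCDEF".toList "012345".toList i toks =
        toks.all (fun s => altOkToken (PySem.Chars.strip s)) := by
  intro toks
  induction toks generalizing i with
  | nil => simp [verifyInputOuter]
  | cons s rest ih =>
      have hi' : (i == 0) = false := by simp [hi]
      simp only [verifyInputOuter, hi', Bool.false_and, Bool.false_eq_true, if_false,
        bne, Bool.not_eq_eq_eq_not, Bool.not_false]
      rw [inner_zero, ih (i + 1) (by omega)]
      cases h : altOkToken (PySem.Chars.strip s) <;> simp [List.all_cons, h]

theorem splitOnGo_ne_nil (sep : List Char) :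
    ∀ (fuel : Nat) (l cur : List Char) (acc : List (List Char)),
      PySem.Chars.splitOn.go sep fuel l cur acc ≠ [] := by
  intro fuel
  induction fuel with
  | zero => intro l cur acc; simp [PySem.Chars.splitOn.go]
  | succ n ih =>
      intro l cur acc
      cases l with
      | nil => simp [PySem.Chars.splitOn.go]
      | cons c rest =>
          simp only [PySem.Chars.splitOn.go]
          split
          · exact ih _ _ _
          · exact ih _ _ _

theorem splitOn_ne_nil (s sep : List Char) : PySem.Chars.splitOn s sep ≠ [] := by
  simp only [PySem.Chars.splitOn]
  exact splitOnGo_ne_nil sep _ _ _ _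

-- ===== VERDICT (by name: the statement is the Claim_ definition above) =====
theorem verifyInput_spec : Claim_equal_verifyInput := by
  intro playerInput _
  unfold Spec_verifyInput verifyInput verifyInput_alt
  cases hs : PySem.Chars.splitOn playerInput.toList [' '] with
  | nil => exact absurd hs (splitOn_ne_nil _ _)
  | cons s0 rest =>
      simp only [List.map_cons, verifyInputOuter]
      cases hfirst : (PySem.Chars.strip s0 == "ship".toList) with
      | false => simp
      | true =>
          simp only [Bool.not_true, Bool.and_false, Bool.false_eq_true, if_false]
          rw [outer_pos 1 (by omega) rest]
          simp [List.all_map, Function.comp_def]
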